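-- pv_equiv track=rewrite | github.com/stephen-cripps/CodeWars | Python/5Kyu/Pick Peaks.py | pick_peaks
-- ===== SOURCE A (Python) =====
-- def is_peak(arr, i):
--     if arr[i] > arr[i-1] and arr[i] > arr[i+1]:
--         return True
--     if arr[i] <= arr[i-1] or arr[i] < arr[i+1]:
--         return False
--
--     # If we've got here, we need to check if the index is the start of a plateau
--     x = 2
--     while True:
--         if i+x == len(arr) or arr[i] < arr[i+x]:
--             return False
--         if arr[i] > arr[i+x]:
--             return True
--         x += 1
--
-- def pick_peaks(arr):
--     positions = []
--     peaks = []
--     for i in range(1, len(arr)-1):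
--         if is_peak(arr, i):
--             positions.append(i)
--             peaks.append(arr[i])
--
--     return {"pos": positions, "peaks": peaks}
-- ===== SOURCE B (Python) =====
-- def pick_peaks(arr):
--     # Single left-to-right pass: remember the index of the last strict rise
--     # (start of a potential peak/plateau); a later strict drop confirms it.
--     positions = []
--     peaks = []
--     cand = None
--     for i in range(1, len(arr)):
--         if arr[i] > arr[i - 1]:
--             cand = i
--         elif arr[i] < arr[i - 1]:
--             if cand is not None:
--                 positions.append(cand)
--                 peaks.append(arr[cand])
--                 cand = None
--     return {"pos": positions, "peaks": peaks}
-- ===== Notes on version B (the rewrite author's own statement) =====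
-- stated objective: alternative
-- what changed: Replaced the per-index is_peak test (which rescans forward over each plateau) by one left-to-right pass that remembers the index of the last strict rise and confirms it as a peak at the next strict drop; measured only ~1.45x on random inputs, so no speed is claimed.
import Mathlib
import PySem

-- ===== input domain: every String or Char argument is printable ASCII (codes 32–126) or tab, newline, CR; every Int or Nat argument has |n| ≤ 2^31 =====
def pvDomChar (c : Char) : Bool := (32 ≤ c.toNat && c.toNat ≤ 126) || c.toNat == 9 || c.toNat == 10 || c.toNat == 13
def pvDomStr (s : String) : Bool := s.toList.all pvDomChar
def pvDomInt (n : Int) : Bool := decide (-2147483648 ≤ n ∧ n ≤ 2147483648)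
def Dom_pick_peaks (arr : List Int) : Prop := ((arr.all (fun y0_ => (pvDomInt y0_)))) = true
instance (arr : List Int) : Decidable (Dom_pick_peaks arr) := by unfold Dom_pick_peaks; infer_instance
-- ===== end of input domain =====

-- B replaces A's per-index plateau rescans by one left-to-right pass that tracks the
-- index of the last strict rise and confirms it as a peak at the next strict drop.

-- ===== PORT A =====

-- arr.getD j 0 is only ever applied at indices the Python code actually reads,
-- all of which are in range (1 ≤ i ≤ len-2 and i+x ≤ len-1 after the bounds test),
-- so the default 0 is never produced.
def pvG (arr : List Int) (j : Nat) : Int := arr.getD j 0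

-- the `while True` scan of is_peak (x starts at 2); Python tests `i+x == len(arr)`,
-- which in every reachable state (i+x ≤ len) coincides with the total guard `len ≤ i+x`.
def pick_peaks_plateau (arr : List Int) (i x : Nat) : Bool :=
  if arr.length ≤ i + x then false
  else if pvG arr i < pvG arr (i + x) then false
  else if pvG arr i > pvG arr (i + x) then true
  else pick_peaks_plateau arr i (x + 1)
termination_by arr.length - (i + x)
decreasing_by omega

def pick_peaks_is_peak (arr : List Int) (i : Nat) : Bool :=
  if pvG arr i > pvG arr (i - 1) ∧ pvG arr i > pvG arr (i + 1) then true
  else if pvG arr i ≤ pvG arr (i - 1) ∨ pvG arr i < pvG arr (i + 1) then false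
  else pick_peaks_plateau arr i 2

def pick_peaks (arr : List Int) : List (String × List Int) :=
  let r := (List.range' 1 (arr.length - 2)).foldl
    (fun (st : List Int × List Int) i =>
      if pick_peaks_is_peak arr i then (st.1 ++ [(i : Int)], st.2 ++ [pvG arr i]) else st)
    ([], [])
  [("pos", r.1), ("peaks", r.2)]

-- ===== PORT B =====

def pick_peaks_alt_step (arr : List Int) (st : List Int × List Int × Option Nat) (i : Nat) :
    List Int × List Int × Option Nat :=
  if pvG arr i > pvG arr (i - 1) then (st.1, st.2.1, some i)
  else if pvG arr i < pvG arr (i - 1) then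
    match st.2.2 with
    | some c => (st.1 ++ [(c : Int)], st.2.1 ++ [pvG arr c], none)
    | none => (st.1, st.2.1, none)
  else st

def pick_peaks_alt (arr : List Int) : List (String × List Int) :=
  let r := (List.range' 1 (arr.length - 1)).foldl (pick_peaks_alt_step arr) ([], [], none)
  [("pos", r.1), ("peaks", r.2.1)]

-- ===== PRECONDITION & SPEC =====
def Spec_pick_peaks (arr : List Int) (out : List (String × List Int)) : Prop := out = pick_peaks_alt arr
instance (arr : List Int) (out : List (String × List Int)) : Decidable (Spec_pick_peaks arr out) := by unfold Spec_pick_peaks; infer_instance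

-- ===== CLAIM (what is proved, stated in full; the proofs are below) =====
def Claim_equal_pick_peaks : Prop := ∀ (arr : List Int), Dom_pick_peaks arr → Spec_pick_peaks arr (pick_peaks arr)

-- ===== LEMMAS AND PROOFS =====

-- first index j' ≥ j with arr[j'] ≠ arr[i], or arr.length if none
def pvFd (arr : List Int) (i j : Nat) : Nat :=
  if arr.length ≤ j then arr.length
  else if pvG arr j ≠ pvG arr i then j
  else pvFd arr i (j + 1)
termination_by arr.length - j
decreasing_by omega

-- B's candidate after the indices 1..k have been processed
def pvC (arr : List Int) : Nat → Option Nat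
  | 0 => none
  | (k + 1) =>
    if pvG arr (k + 1) > pvG arr k then some (k + 1)
    else if pvG arr (k + 1) < pvG arr k then none
    else pvC arr k

-- "i is a peak confirmed by index k": strict rise into i, and the first later
-- different value occurs at an index ≤ k and is smaller
def pvQ (arr : List Int) (k i : Nat) : Bool :=
  decide (pvG arr (i - 1) < pvG arr i ∧ pvFd arr i (i + 1) ≤ k ∧
    pvG arr (pvFd arr i (i + 1)) < pvG arr i)

-- positions confirmed after the indices 1..k have been processed
def pvL (arr : List Int) (k : Nat) : List Nat := (List.range' 1 k).filter (pvQ arr k)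

theorem pvFd_bounds (arr : List Int) (i j : Nat) (hj : j ≤ arr.length) :
    j ≤ pvFd arr i j ∧ pvFd arr i j ≤ arr.length := by
  fun_induction pvFd arr i j with
  | case1 j h => omega
  | case2 j h hne => omega
  | case3 j h hne ih => have := ih (by omega); omega

theorem pvFd_eq_of_lt (arr : List Int) (i j : Nat) :
    ∀ m, j ≤ m → m < pvFd arr i j → pvG arr m = pvG arr i := by
  fun_induction pvFd arr i j with
  | case1 j h => intro m h1 h2; omega
  | case2 j h hne => intro m h1 h2; omega
  | case3 j h hne ih =>
    intro m h1 h2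
    rcases Nat.eq_or_lt_of_le h1 with h3 | h3
    · simpa [← h3] using not_not.mp hne
    · exact ih m h3 h2

theorem pvFd_ne (arr : List Int) (i j : Nat) (h : pvFd arr i j < arr.length) :
    pvG arr (pvFd arr i j) ≠ pvG arr i := by
  fun_induction pvFd arr i j with
  | case1 j h' => omega
  | case2 j h' hne => exact hne
  | case3 j h' hne ih => exact ih h

theorem pvFd_le_of_ne (arr : List Int) (i j m : Nat) (hjm : j ≤ m) (hm : m < arr.length)
    (hne : pvG arr m ≠ pvG arr i) : pvFd arr i j ≤ m := by
  fun_induction pvFd arr i j with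
  | case1 j h' => omega
  | case2 j h' hne' => omega
  | case3 j h' hne' ih =>
    rcases Nat.eq_or_lt_of_le hjm with h3 | h3
    · exact absurd (h3 ▸ hne) (by simpa using not_not.mp hne')
    · exact ih h3

theorem pvFd_skip (arr : List Int) (i j : Nat) (h : pvG arr j = pvG arr i) :
    pvFd arr i j = pvFd arr i (j + 1) := by
  rw [pvFd]
  by_cases h1 : arr.length ≤ j
  · simp [h1]; rw [pvFd]; simp [show arr.length ≤ j + 1 by omega]
  · simp [h1, h]

theorem plateau_eq (arr : List Int) (i x : Nat) :
    pick_peaks_plateau arr i x =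
      decide (pvFd arr i (i + x) < arr.length ∧ pvG arr (pvFd arr i (i + x)) < pvG arr i) := by
  fun_induction pick_peaks_plateau arr i x with
  | case1 x h =>
    rw [pvFd]; simp [h]
  | case2 x h hlt =>
    rw [pvFd]
    have hne : pvG arr (i + x) ≠ pvG arr i := by omega
    simp [h, hne]; omega
  | case3 x h hlt hgt =>
    rw [pvFd]
    have hne : pvG arr (i + x) ≠ pvG arr i := by omega
    simp [h, hne]; omega
  | case4 x h hlt hgt ih =>
    have he : pvG arr (i + x) = pvG arr i := by omega
    rw [pvFd_skip arr i (i + x) he]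
    simpa [show i + (x + 1) = i + x + 1 by omega] using ih

theorem is_peak_eq (arr : List Int) (i : Nat) (h1 : 1 ≤ i) (h2 : i + 2 ≤ arr.length) :
    pick_peaks_is_peak arr i = pvQ arr (arr.length - 1) i := by
  have hn1 : ¬ arr.length ≤ i + 1 := by omega
  unfold pick_peaks_is_peak pvQ
  by_cases hA : pvG arr i > pvG arr (i - 1) ∧ pvG arr i > pvG arr (i + 1)
  · have hfd : pvFd arr i (i + 1) = i + 1 := by
      rw [pvFd]; simp [hn1, show pvG arr (i + 1) ≠ pvG arr i by omega]
    rw [if_pos hA, hfd, eq_comm, decide_eq_true_eq]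
    exact ⟨by omega, by omega, by omega⟩
  · rw [if_neg hA]
    by_cases hB : pvG arr i ≤ pvG arr (i - 1) ∨ pvG arr i < pvG arr (i + 1)
    · rw [if_pos hB, eq_comm, decide_eq_false_iff_not]
      rcases hB with hB | hB
      · rintro ⟨a, -, -⟩; omega
      · have hfd : pvFd arr i (i + 1) = i + 1 := by
          rw [pvFd]; simp [hn1, show pvG arr (i + 1) ≠ pvG arr i by omega]
        rw [hfd]; rintro ⟨-, -, c⟩; omega
    · rw [if_neg hB, plateau_eq]
      obtain ⟨hb1, hb2⟩ := not_or.mp hB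
      have he : pvG arr (i + 1) = pvG arr i := by
        rcases not_and_or.mp hA with h | h <;> omega
      rw [show i + 2 = (i + 1) + 1 from rfl, ← pvFd_skip arr i (i + 1) he]
      simp only [decide_eq_decide]
      constructor
      · rintro ⟨a, b⟩; exact ⟨by omega, by omega, b⟩
      · rintro ⟨-, a, b⟩; exact ⟨by omega, b⟩

theorem pvC_some (arr : List Int) (k c : Nat) (h : pvC arr k = some c) :
    1 ≤ c ∧ c ≤ k ∧ pvG arr (c - 1) < pvG arr c ∧
      (∀ j, c < j → j ≤ k → pvG arr j = pvG arr c) := by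
  induction k with
  | zero => simp [pvC] at h
  | succ k ih =>
    rw [pvC] at h
    split at h
    · next hgt =>
      obtain rfl : k + 1 = c := by simpa using h
      exact ⟨by omega, le_refl _, by simpa using hgt, fun j hj1 hj2 => by omega⟩
    · split at h
      · simp at h
      · next hgt hlt =>
        have he : pvG arr (k + 1) = pvG arr k := by omega
        obtain ⟨a, b, cc, d⟩ := ih h
        refine ⟨a, by omega, cc, fun j hj1 hj2 => ?_⟩
        rcases Nat.lt_or_ge j (k + 1) with h' | h'
        · exact d j hj1 (by omega)
        · obtain rfl : j = k + 1 := by omega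
          rw [he]
          rcases Nat.eq_or_lt_of_le b with rfl | hck
          · rfl
          · exact d k (by omega) (le_refl _)

theorem pvC_none (arr : List Int) (k c : Nat) (h : pvC arr k = none) (h1 : 1 ≤ c) (h2 : c ≤ k)
    (h3 : pvG arr (c - 1) < pvG arr c) (h4 : ∀ j, c < j → j ≤ k → pvG arr j = pvG arr c) :
    False := by
  induction k with
  | zero => omega
  | succ k ih =>
    rw [pvC] at h
    split at h
    · simp at h
    · split at h
      · next hgt hlt =>
        rcases Nat.eq_or_lt_of_le h2 with rfl | hck
        · simp at h3; omega
        · have hk1 : pvG arr (k + 1) = pvG arr c := h4 (k + 1) (by omega) (le_refl _)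
          have hk : pvG arr k = pvG arr c := by
            rcases Nat.eq_or_lt_of_le (show c ≤ k by omega) with rfl | h'
            · rfl
            · exact h4 k (by omega) (by omega)
          omega
      · next hgt hlt =>
        have he : pvG arr (k + 1) = pvG arr k := by omega
        rcases Nat.eq_or_lt_of_le h2 with rfl | hck
        · simp at h3; omega
        · exact ih h (by omega) (fun j hj1 hj2 => h4 j hj1 (by omega))

theorem pv_run_unique (arr : List Int) (k c c' : Nat)
    (hc : 1 ≤ c ∧ c ≤ k ∧ pvG arr (c - 1) < pvG arr c ∧ (∀ j, c < j → j ≤ k → pvG arr j = pvG arr c))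
    (hc' : 1 ≤ c' ∧ c' ≤ k ∧ pvG arr (c' - 1) < pvG arr c' ∧ (∀ j, c' < j → j ≤ k → pvG arr j = pvG arr c')) :
    c = c' := by
  obtain ⟨a1, a2, a3, a4⟩ := hc
  obtain ⟨b1, b2, b3, b4⟩ := hc'
  by_contra hne
  rcases Nat.lt_or_ge c c' with h | h
  · have e1 : pvG arr c' = pvG arr c := a4 c' h b2
    have e2 : pvG arr (c' - 1) = pvG arr c := by
      rcases Nat.eq_or_lt_of_le (show c ≤ c' - 1 by omega) with h' | h'
      · rw [← h']
      · exact a4 (c' - 1) h' (by omega)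
    omega
  · have h : c' < c := by omega
    have e1 : pvG arr c = pvG arr c' := b4 c h a2
    have e2 : pvG arr (c - 1) = pvG arr c' := by
      rcases Nat.eq_or_lt_of_le (show c' ≤ c - 1 by omega) with h' | h'
      · rw [← h']
      · exact b4 (c - 1) h' (by omega)
    omega

theorem fd_run (arr : List Int) (i k : Nat) (hfd : k < pvFd arr i (i + 1)) :
    ∀ j, i < j → j ≤ k → pvG arr j = pvG arr i :=
  fun j hj1 hj2 => pvFd_eq_of_lt arr i (i + 1) j (by omega) (by omega)

theorem fd_gk (arr : List Int) (i k : Nat) (hik : i ≤ k) (hfd : k < pvFd arr i (i + 1)) :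
    pvG arr k = pvG arr i := by
  rcases Nat.eq_or_lt_of_le hik with rfl | h
  · rfl
  · exact fd_run arr i k hfd k h (le_refl _)

theorem pvQ_self_false (arr : List Int) (k' k : Nat) (hkn : k + 2 ≤ arr.length)
    (hk' : k' ≤ k + 1) : pvQ arr k' (k + 1) = false := by
  unfold pvQ
  rw [decide_eq_false_iff_not]
  rintro ⟨-, p2, -⟩
  have := (pvFd_bounds arr (k + 1) (k + 1 + 1) (by omega)).1
  omega

theorem pvQ_step_rise (arr : List Int) (k i : Nat) (h1 : 1 ≤ i) (hik : i ≤ k)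
    (hkn : k + 2 ≤ arr.length) (hr : pvG arr k < pvG arr (k + 1)) :
    pvQ arr (k + 1) i = pvQ arr k i := by
  unfold pvQ
  simp only [decide_eq_decide]
  rcases Nat.lt_or_ge k (pvFd arr i (i + 1)) with hgt | hle
  · have hgk : pvG arr k = pvG arr i := fd_gk arr i k hik hgt
    constructor
    · rintro ⟨p1, p2, p3⟩
      have hfk : pvFd arr i (i + 1) = k + 1 := by omega
      rw [hfk] at p3; omega
    · rintro ⟨p1, p2, p3⟩; omega
  · constructor <;> (rintro ⟨p1, p2, p3⟩; exact ⟨p1, by omega, p3⟩)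

theorem pvQ_step_eq (arr : List Int) (k i : Nat) (h1 : 1 ≤ i) (hik : i ≤ k)
    (hkn : k + 2 ≤ arr.length) (he : pvG arr (k + 1) = pvG arr k) :
    pvQ arr (k + 1) i = pvQ arr k i := by
  unfold pvQ
  simp only [decide_eq_decide]
  rcases Nat.lt_or_ge k (pvFd arr i (i + 1)) with hgt | hle
  · have hgk : pvG arr k = pvG arr i := fd_gk arr i k hik hgt
    constructor
    · rintro ⟨p1, p2, p3⟩
      have hfk : pvFd arr i (i + 1) = k + 1 := by omega
      have hne := pvFd_ne arr i (i + 1) (by omega)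
      rw [hfk] at hne; omega
    · rintro ⟨p1, p2, p3⟩; omega
  · constructor <;> (rintro ⟨p1, p2, p3⟩; exact ⟨p1, by omega, p3⟩)

theorem pvQ_step_drop_none (arr : List Int) (k i : Nat) (h1 : 1 ≤ i) (hik : i ≤ k)
    (hkn : k + 2 ≤ arr.length) (hn : pvC arr k = none) :
    pvQ arr (k + 1) i = pvQ arr k i := by
  unfold pvQ
  simp only [decide_eq_decide]
  rcases Nat.lt_or_ge k (pvFd arr i (i + 1)) with hgt | hle
  · constructor
    · rintro ⟨p1, p2, p3⟩
      exact (pvC_none arr k i hn h1 hik p1 (fd_run arr i k hgt)).elim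
    · rintro ⟨p1, p2, p3⟩; omega
  · constructor <;> (rintro ⟨p1, p2, p3⟩; exact ⟨p1, by omega, p3⟩)

theorem pvQ_step_drop_some (arr : List Int) (k i c : Nat) (h1 : 1 ≤ i) (hik : i ≤ k)
    (hkn : k + 2 ≤ arr.length) (hc : pvC arr k = some c) (hne : i ≠ c) :
    pvQ arr (k + 1) i = pvQ arr k i := by
  unfold pvQ
  simp only [decide_eq_decide]
  rcases Nat.lt_or_ge k (pvFd arr i (i + 1)) with hgt | hle
  · constructor
    · rintro ⟨p1, p2, p3⟩
      obtain ⟨a, b, cc, d⟩ := pvC_some arr k c hc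
      exact (hne (pv_run_unique arr k i c ⟨h1, hik, p1, fd_run arr i k hgt⟩ ⟨a, b, cc, d⟩)).elim
    · rintro ⟨p1, p2, p3⟩; omega
  · constructor <;> (rintro ⟨p1, p2, p3⟩; exact ⟨p1, by omega, p3⟩)

theorem pvQ_drop_cand (arr : List Int) (k c : Nat) (hkn : k + 2 ≤ arr.length)
    (hc : pvC arr k = some c) (hd : pvG arr (k + 1) < pvG arr k) :
    pvQ arr (k + 1) c = true ∧ pvQ arr k c = false := by
  obtain ⟨a, b, cc, d⟩ := pvC_some arr k c hc
  have hgk : pvG arr k = pvG arr c := by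
    rcases Nat.eq_or_lt_of_le b with rfl | h
    · rfl
    · exact d k h (le_refl _)
  have hfdgt : k < pvFd arr c (c + 1) := by
    by_contra h
    push Not at h
    have h1 := (pvFd_bounds arr c (c + 1) (by omega)).1
    have h2 := pvFd_ne arr c (c + 1) (by omega)
    exact h2 (d _ (by omega) (by omega))
  have hfdle : pvFd arr c (c + 1) ≤ k + 1 :=
    pvFd_le_of_ne arr c (c + 1) (k + 1) (by omega) (by omega) (by omega)
  have hfd : pvFd arr c (c + 1) = k + 1 := by omega
  constructor
  · unfold pvQ
    rw [decide_eq_true_eq]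
    exact ⟨cc, by omega, by rw [hfd]; omega⟩
  · unfold pvQ
    rw [decide_eq_false_iff_not]
    rintro ⟨-, p2, -⟩; omega

theorem pvQ_true_lt_cand (arr : List Int) (k c i : Nat) (hkn : k + 2 ≤ arr.length)
    (hc : pvC arr k = some c) (h1 : 1 ≤ i) (hik : i ≤ k) (hq : pvQ arr k i = true) : i < c := by
  obtain ⟨a, b, cc, d⟩ := pvC_some arr k c hc
  unfold pvQ at hq
  rw [decide_eq_true_eq] at hq
  obtain ⟨p1, p2, p3⟩ := hq
  by_contra h
  push Not at h
  rcases Nat.eq_or_lt_of_le h with heq | hlt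
  · -- i = c : but pvQ arr k c = false since fd c > k
    subst heq
    have hfdgt : k < pvFd arr c (c + 1) := by
      by_contra h'
      push Not at h'
      have hb := (pvFd_bounds arr c (c + 1) (by omega)).1
      have h2 := pvFd_ne arr c (c + 1) (by omega)
      exact h2 (d _ (by omega) (by omega))
    omega
  · have e1 : pvG arr i = pvG arr c := d i hlt hik
    have e2 : pvG arr (i - 1) = pvG arr c := by
      rcases Nat.eq_or_lt_of_le (show c ≤ i - 1 by omega) with h' | h'
      · rw [← h']
      · exact d (i - 1) h' (by omega)
    omega

theorem pvL_step_noemit (arr : List Int) (k : Nat) (hkn : k + 2 ≤ arr.length)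
    (hcong : ∀ i, 1 ≤ i → i ≤ k → pvQ arr (k + 1) i = pvQ arr k i) :
    pvL arr (k + 1) = pvL arr k := by
  unfold pvL
  rw [List.range'_concat, List.filter_append]
  have hself : pvQ arr (k + 1) (1 + 1 * k) = false := by
    simpa [Nat.add_comm] using pvQ_self_false arr (k + 1) k hkn (le_refl _)
  simp only [List.filter_cons, List.filter_nil, hself, Bool.false_eq_true, if_false, List.append_nil]
  apply List.filter_congr
  intro i hi
  have hm := List.mem_range'_1.mp hi
  exact hcong i (by omega) (by omega)

theorem pvL_step_emit (arr : List Int) (k c : Nat) (hkn : k + 2 ≤ arr.length)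
    (hc : pvC arr k = some c) (hd : pvG arr (k + 1) < pvG arr k) :
    pvL arr (k + 1) = pvL arr k ++ [c] := by
  obtain ⟨a, b, cc, d⟩ := pvC_some arr k c hc
  obtain ⟨hq1, hq0⟩ := pvQ_drop_cand arr k c hkn hc hd
  -- split range' 1 k around c
  have hsplit : List.range' 1 k = List.range' 1 (c - 1) ++ c :: List.range' (c + 1) (k - c) := by
    have h1 : List.range' 1 (c - 1) ++ List.range' (1 + 1 * (c - 1)) (k - (c - 1)) = List.range' 1 k := by
      rw [List.range'_append]; congr 1; omega
    rw [← h1]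
    congr 1
    have : 1 + 1 * (c - 1) = c := by omega
    rw [this, show k - (c - 1) = (k - c) + 1 by omega, List.range'_succ]
  unfold pvL
  rw [List.range'_concat, List.filter_append]
  have hself : pvQ arr (k + 1) (1 + 1 * k) = false := by
    simpa [Nat.add_comm] using pvQ_self_false arr (k + 1) k hkn (le_refl _)
  simp only [List.filter_cons, List.filter_nil, hself, Bool.false_eq_true, if_false, List.append_nil]
  rw [hsplit, List.filter_append, List.filter_append, List.filter_cons,
    List.filter_cons, hq1, hq0]
  have hpart1 : (List.range' 1 (c - 1)).filter (pvQ arr (k + 1)) =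
      (List.range' 1 (c - 1)).filter (pvQ arr k) := by
    apply List.filter_congr
    intro i hi
    have hm := List.mem_range'_1.mp hi
    exact pvQ_step_drop_some arr k i c (by omega) (by omega) hkn hc (by omega)
  have hpart3a : (List.range' (c + 1) (k - c)).filter (pvQ arr k) = [] := by
    rw [List.filter_eq_nil_iff]
    intro i hi
    have hm := List.mem_range'_1.mp hi
    intro hq
    have := pvQ_true_lt_cand arr k c i hkn hc (by omega) (by omega) hq
    omega
  have hpart3b : (List.range' (c + 1) (k - c)).filter (pvQ arr (k + 1)) = [] := by
    rw [List.filter_eq_nil_iff]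
    intro i hi
    have hm := List.mem_range'_1.mp hi
    intro hq
    rw [pvQ_step_drop_some arr k i c (by omega) (by omega) hkn hc (by omega)] at hq
    have := pvQ_true_lt_cand arr k c i hkn hc (by omega) (by omega) hq
    omega
  rw [hpart1, hpart3a, hpart3b]
  simp

theorem pv_inv (arr : List Int) (k : Nat) (hk : k + 1 ≤ arr.length) :
    (List.range' 1 k).foldl (pick_peaks_alt_step arr) ([], [], none) =
      ((pvL arr k).map Int.ofNat, (pvL arr k).map (pvG arr), pvC arr k) := by
  induction k with
  | zero => simp [pvL, pvC]
  | succ k ih =>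
    rw [List.range'_concat, List.foldl_append, ih (by omega)]
    have hidx : 1 + 1 * k = k + 1 := by omega
    rw [hidx]
    show pick_peaks_alt_step arr _ (k + 1) = _
    rw [pick_peaks_alt_step]
    simp only [Nat.add_sub_cancel]
    by_cases hr : pvG arr (k + 1) > pvG arr k
    · rw [if_pos hr]
      have hL : pvL arr (k + 1) = pvL arr k :=
        pvL_step_noemit arr k (by omega) (fun i a b => pvQ_step_rise arr k i a b (by omega) hr)
      have hC : pvC arr (k + 1) = some (k + 1) := by rw [pvC, if_pos hr]
      rw [hL, hC]
    · rw [if_neg hr]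
      by_cases hd : pvG arr (k + 1) < pvG arr k
      · rw [if_pos hd]
        cases hcc : pvC arr k with
        | none =>
          have hL : pvL arr (k + 1) = pvL arr k :=
            pvL_step_noemit arr k (by omega)
              (fun i a b => pvQ_step_drop_none arr k i a b (by omega) hcc)
          have hC : pvC arr (k + 1) = none := by rw [pvC, if_neg hr, if_pos hd]
          simp only [hL, hC]
        | some c =>
          have hL : pvL arr (k + 1) = pvL arr k ++ [c] :=
            pvL_step_emit arr k c (by omega) hcc hd
          have hC : pvC arr (k + 1) = none := by rw [pvC, if_neg hr, if_pos hd]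
          simp only [hL, hC, List.map_append, List.map_cons, List.map_nil]
          rfl
      · rw [if_neg hd]
        have he : pvG arr (k + 1) = pvG arr k := by omega
        have hL : pvL arr (k + 1) = pvL arr k :=
          pvL_step_noemit arr k (by omega) (fun i a b => pvQ_step_eq arr k i a b (by omega) he)
        have hC : pvC arr (k + 1) = pvC arr k := by rw [pvC, if_neg hr, if_neg hd]
        rw [hL, hC]

theorem foldA (arr : List Int) (l : List Nat) (acc : List Int × List Int) :
    l.foldl (fun (st : List Int × List Int) i =>
        if pick_peaks_is_peak arr i then (st.1 ++ [(i : Int)], st.2 ++ [pvG arr i]) else st)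
      acc =
      (acc.1 ++ (l.filter (pick_peaks_is_peak arr)).map Int.ofNat,
       acc.2 ++ (l.filter (pick_peaks_is_peak arr)).map (pvG arr)) := by
  induction l generalizing acc with
  | nil => simp
  | cons x l ih =>
    simp only [List.foldl_cons, List.filter_cons]
    by_cases h : pick_peaks_is_peak arr x
    · rw [if_pos h, ih, if_pos h]
      simp
    · rw [if_neg h, ih]
      simp [h]

theorem final_filter (arr : List Int) :
    (List.range' 1 (arr.length - 2)).filter (pick_peaks_is_peak arr) = pvL arr (arr.length - 1) := by
  unfold pvL
  rcases Nat.lt_or_ge arr.length 2 with hn | hn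
  · have h2 : arr.length - 2 = 0 := by omega
    have h1 : arr.length - 1 = 0 := by omega
    rw [h1, h2]; rfl
  · have hsplit : List.range' 1 (arr.length - 1) = List.range' 1 (arr.length - 2) ++ [1 + 1 * (arr.length - 2)] := by
      rw [← List.range'_concat]; congr 1; omega
    have hself : pvQ arr (arr.length - 1) (1 + 1 * (arr.length - 2)) = false := by
      have := pvQ_self_false arr (arr.length - 1) (arr.length - 2) (by omega) (by omega)
      simpa [Nat.add_comm] using this
    rw [hsplit, List.filter_append]
    simp only [List.filter_cons, List.filter_nil, hself, Bool.false_eq_true, if_false, List.append_nil]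
    apply List.filter_congr
    intro i hi
    have hm := List.mem_range'_1.mp hi
    exact is_peak_eq arr i (by omega) (by omega)

theorem pick_peaks_spec' (arr : List Int) : pick_peaks arr = pick_peaks_alt arr := by
  unfold pick_peaks pick_peaks_alt
  rcases Nat.eq_zero_or_pos arr.length with h0 | hpos
  · rw [h0]; rfl
  · rw [foldA, final_filter, pv_inv arr (arr.length - 1) (by omega)]
    simp

-- ===== VERDICT (by name: the statement is the Claim_ definition above) =====
theorem pick_peaks_spec : Claim_equal_pick_peaks := by
  intro arr _
  unfold Spec_pick_peaks
  exact pick_peaks_spec' arr
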